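-- pv_equiv track=rewrite | github.com/josephchenhk/riichi_mahjong | train_model/utils/tile.py | to_one_line_string
-- ===== SOURCE A (Python) =====
-- def to_one_line_string(tiles):
--     """
--     Convert 136 tiles array to the one line string
--     Example of output 123s123p123m33z
--     """
--     tiles = sorted(tiles)
--
--     man = [t for t in tiles if t < 36]
--
--     pin = [t for t in tiles if 36 <= t < 72]
--     pin = [t - 36 for t in pin]
--
--     sou = [t for t in tiles if 72 <= t < 108]
--     sou = [t - 72 for t in sou]
--
--     honors = [t for t in tiles if t >= 108]
--     honors = [t - 108 for t in honors]
--
--     sou = sou and ''.join([str((i // 4) + 1) for i in sou]) + 's' or ''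
--     pin = pin and ''.join([str((i // 4) + 1) for i in pin]) + 'p' or ''
--     man = man and ''.join([str((i // 4) + 1) for i in man]) + 'm' or ''
--     honors = honors and ''.join([str((i // 4) + 1) for i in honors]) + 'z' or ''
--
--     return man + pin + sou + honors
-- ===== SOURCE B (Python) =====
-- def to_one_line_string(tiles):
--     """
--     Convert 136 tiles array to the one line string (e.g. 123m123p123s33z)
--     without sorting the tiles: one counting pass builds a histogram keyed by
--     tile type t//4, then the ascending type keys are emitted once into four
--     suit buffers.
--     """
--     qs = [t // 4 for t in tiles]
--     hist = {}
--     for q in qs: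
--         hist[q] = hist.get(q, 0) + 1
--     man = pin = sou = honors = ''
--     for q in sorted(hist):
--         if q < 9:
--             man += str(q + 1) * hist[q]
--         elif q < 18:
--             pin += str(q - 8) * hist[q]
--         elif q < 27:
--             sou += str(q - 17) * hist[q]
--         else:
--             honors += str(q - 26) * hist[q]
--     if man:
--         man += 'm'
--     if pin:
--         pin += 'p'
--     if sou:
--         sou += 's'
--     if honors:
--         honors += 'z'
--     return man + pin + sou + honors
-- ===== Notes on version B (the rewrite author's own statement) =====
-- stated objective: alternative
-- what changed: Replaces the comparison sort of all tiles plus four filtering passes with a single counting pass into a histogram keyed by tile type t//4, whose ascending keys are then emitted once into the four suit buffers.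
import Mathlib
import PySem

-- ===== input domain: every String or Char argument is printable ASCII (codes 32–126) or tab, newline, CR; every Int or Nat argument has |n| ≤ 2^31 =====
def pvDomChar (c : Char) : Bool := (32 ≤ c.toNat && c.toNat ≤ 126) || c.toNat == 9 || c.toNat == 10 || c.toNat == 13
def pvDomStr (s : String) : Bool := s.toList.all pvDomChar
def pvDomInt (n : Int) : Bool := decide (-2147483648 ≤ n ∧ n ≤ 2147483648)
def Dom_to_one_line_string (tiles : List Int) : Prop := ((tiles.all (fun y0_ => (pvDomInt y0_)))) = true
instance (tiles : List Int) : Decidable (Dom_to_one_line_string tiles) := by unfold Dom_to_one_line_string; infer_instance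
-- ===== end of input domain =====

-- B replaces A's full sort + four filtering passes by one counting pass into a
-- histogram keyed by tile type t//4 whose ascending keys are emitted once into
-- four suit buffers (alternative algorithm, similar cost; return value only).

-- ===== PORT A =====
def to_one_line_string (tiles : List Int) : String :=
  let ts := PySem.List.sorted tiles (fun t => t) false
  let man := ts.filter (fun t => decide (t < 36))
  let pin := (ts.filter (fun t => decide (36 ≤ t ∧ t < 72))).map (fun t => t - 36)
  let sou := (ts.filter (fun t => decide (72 ≤ t ∧ t < 108))).map (fun t => t - 72)
  let honors := (ts.filter (fun t => decide (108 ≤ t))).map (fun t => t - 108)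
  let souS := if sou = [] then "" else
    PySem.Str.join "" (sou.map (fun i => PySem.Int.toStr (PySem.Int.floordiv i 4 + 1))) ++ "s"
  let pinS := if pin = [] then "" else
    PySem.Str.join "" (pin.map (fun i => PySem.Int.toStr (PySem.Int.floordiv i 4 + 1))) ++ "p"
  let manS := if man = [] then "" else
    PySem.Str.join "" (man.map (fun i => PySem.Int.toStr (PySem.Int.floordiv i 4 + 1))) ++ "m"
  let honorsS := if honors = [] then "" else
    PySem.Str.join "" (honors.map (fun i => PySem.Int.toStr (PySem.Int.floordiv i 4 + 1))) ++ "z"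
  manS ++ pinS ++ souS ++ honorsS

-- ===== PORT B =====
-- exact port of Python's  s * n  on a str (empty for n <= 0)
def pyStrRepeat (s : String) (n : Int) : String :=
  String.ofList (PySem.List.pyRepeat s.toList n)

def to_one_line_string_alt (tiles : List Int) : String :=
  let qs := tiles.map (fun t => PySem.Int.floordiv t 4)
  let hist := qs.foldl (fun d q => d.insert q (d.getD q 0 + 1)) PySem.Dict.empty
  let bufs := (PySem.List.sorted hist.keys (fun k => k) false).foldl
    (fun (b : String × String × String × String) q =>
      if q < 9 then
        (b.1 ++ pyStrRepeat (PySem.Int.toStr (q + 1)) (hist.getD q 0), b.2.1, b.2.2.1, b.2.2.2)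
      else if q < 18 then
        (b.1, b.2.1 ++ pyStrRepeat (PySem.Int.toStr (q - 8)) (hist.getD q 0), b.2.2.1, b.2.2.2)
      else if q < 27 then
        (b.1, b.2.1, b.2.2.1 ++ pyStrRepeat (PySem.Int.toStr (q - 17)) (hist.getD q 0), b.2.2.2)
      else
        (b.1, b.2.1, b.2.2.1, b.2.2.2 ++ pyStrRepeat (PySem.Int.toStr (q - 26)) (hist.getD q 0)))
    ("", "", "", "")
  let man := if bufs.1 = "" then bufs.1 else bufs.1 ++ "m"
  let pin := if bufs.2.1 = "" then bufs.2.1 else bufs.2.1 ++ "p"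
  let sou := if bufs.2.2.1 = "" then bufs.2.2.1 else bufs.2.2.1 ++ "s"
  let honors := if bufs.2.2.2 = "" then bufs.2.2.2 else bufs.2.2.2 ++ "z"
  man ++ pin ++ sou ++ honors

-- ===== PRECONDITION & SPEC =====
def Spec_to_one_line_string (tiles : List Int) (out : String) : Prop := out = to_one_line_string_alt tiles
instance (tiles : List Int) (out : String) : Decidable (Spec_to_one_line_string tiles out) := by unfold Spec_to_one_line_string; infer_instance

-- ===== CLAIM (what is proved, stated in full; the proofs are below) =====
def Claim_equal_to_one_line_string : Prop := ∀ (tiles : List Int), Dom_to_one_line_string tiles → Spec_to_one_line_string tiles (to_one_line_string tiles)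

-- ===== LEMMAS AND PROOFS =====

theorem pv_qf_eq (t : Int) : PySem.Int.floordiv t 4 = t / 4 :=
  PySem.Int.floordiv_eq_ediv_of_pos (by norm_num)

theorem pv_join_nil_eq_flatten : ∀ (l : List (List Char)), PySem.Chars.join [] l = l.flatten
  | [] => by simp [PySem.Chars.join_nil]
  | [a] => by simp [PySem.Chars.join_singleton]
  | a :: b :: r => by
      rw [PySem.Chars.join_cons_cons, pv_join_nil_eq_flatten (b :: r)]; simp

theorem pv_toDigits_ne_nil (n : Nat) : Nat.toDigits 10 n ≠ [] := by
  have h : 0 < (Nat.toDigits 10 n).length := by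
    unfold Nat.toDigits Nat.toDigitsCore
    by_cases h : n / 10 = 0
    · simp [h]
    · simp only [h, if_false]
      rw [Nat.toDigitsCore_lens_eq]; omega
  intro he; rw [he] at h; simp at h

theorem pv_toChars_ne_nil (n : Int) : PySem.Int.toChars n ≠ [] := by
  unfold PySem.Int.toChars
  split_ifs with h
  · simp
  · exact pv_toDigits_ne_nil _

theorem pv_count_flatMap_replicate (c : Int → Nat) (a : Int) :
    ∀ (ks : List Int), ks.Nodup →
      (ks.flatMap (fun k => List.replicate (c k) k)).count a = if a ∈ ks then c a else 0
  | [], _ => by simp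
  | k :: ks, h => by
      simp only [List.flatMap_cons, List.count_append, List.count_replicate,
        pv_count_flatMap_replicate c a ks (h.of_cons)]
      rcases List.nodup_cons.mp h with ⟨hk, _⟩
      by_cases hak : a = k
      · subst hak; simp [hk]
      · simp [hak, Ne.symm hak, List.mem_cons]

theorem pv_pairwise_flatMap_replicate (c : Int → Nat) :
    ∀ (ks : List Int), ks.Pairwise (· < ·) →
      (ks.flatMap (fun k => List.replicate (c k) k)).Pairwise (· ≤ ·)
  | [], _ => by simp
  | k :: ks, h => by
      rcases List.pairwise_cons.mp h with ⟨hk, htl⟩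
      simp only [List.flatMap_cons]
      refine List.pairwise_append.mpr ⟨?_, pv_pairwise_flatMap_replicate c ks htl, ?_⟩
      · rw [List.pairwise_replicate]; right; exact le_refl k
      · intro x hx y hy
        rcases List.mem_flatMap.mp hy with ⟨k', hk', hy'⟩
        rw [List.eq_of_mem_replicate hx, List.eq_of_mem_replicate hy']
        exact le_of_lt (hk k' hk')

theorem pv_flat_piece (c : Int → Nat) (p : Int → Bool) (g : Int → List Char) :
    ∀ (ks : List Int),
      ((ks.flatMap (fun k => List.replicate (c k) k)).filter p).flatMap g
        = (ks.filter p).flatMap (fun k => (List.replicate (c k) (g k)).flatten)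
  | [] => by simp
  | k :: ks => by
      simp only [List.flatMap_cons, List.filter_append, List.flatMap_append,
        List.filter_replicate, List.filter_cons]
      rw [pv_flat_piece c p g ks]
      by_cases hk : p k
      · simp [hk, List.flatMap_replicate]
      · simp [hk]

theorem pv_qf_mono {a b : Int} (h : a ≤ b) :
    PySem.Int.floordiv a 4 ≤ PySem.Int.floordiv b 4 := by
  rw [pv_qf_eq, pv_qf_eq]; omega

theorem pv_sorted_map_eq_flat (tiles : List Int) :
    (PySem.List.sorted tiles (fun t => t) false).map (fun t => PySem.Int.floordiv t 4)
      = (PySem.List.sorted (PySem.Set.ofList (tiles.map (fun t => PySem.Int.floordiv t 4)))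
          (fun k => k) false).flatMap
          (fun k => List.replicate ((tiles.map (fun t => PySem.Int.floordiv t 4)).count k) k) := by
  have hplt := PySem.List.sorted_ofList_pairwise_lt
    (tiles.map (fun t => PySem.Int.floordiv t 4))
  have hnodup : (PySem.List.sorted (PySem.Set.ofList (tiles.map (fun t => PySem.Int.floordiv t 4)))
      (fun k => k) false).Nodup := hplt.imp (fun h => ne_of_lt h)
  have hmemks : ∀ a, a ∈ PySem.List.sorted (PySem.Set.ofList (tiles.map (fun t => PySem.Int.floordiv t 4)))
      (fun k => k) false ↔ a ∈ tiles.map (fun t => PySem.Int.floordiv t 4) := by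
    intro a
    rw [PySem.List.mem_sorted]
    exact PySem.Set.mem_ofList _ a
  -- LHS is a permutation of qs
  have hpl : ((PySem.List.sorted tiles (fun t => t) false).map
      (fun t => PySem.Int.floordiv t 4)).Perm (tiles.map (fun t => PySem.Int.floordiv t 4)) :=
    (PySem.List.sorted_perm tiles (fun t => t) false).map _
  -- RHS is a permutation of qs
  have hpr : ((PySem.List.sorted (PySem.Set.ofList (tiles.map (fun t => PySem.Int.floordiv t 4)))
      (fun k => k) false).flatMap
      (fun k => List.replicate ((tiles.map (fun t => PySem.Int.floordiv t 4)).count k) k)).Perm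
      (tiles.map (fun t => PySem.Int.floordiv t 4)) := by
    rw [List.perm_iff_count]
    intro a
    rw [pv_count_flatMap_replicate _ a _ hnodup]
    by_cases h : a ∈ tiles.map (fun t => PySem.Int.floordiv t 4)
    · rw [if_pos ((hmemks a).mpr h)]
    · rw [if_neg (fun hc => h ((hmemks a).mp hc)), List.count_eq_zero.mpr h]
  -- both are sorted (Pairwise ≤)
  have hsl : ((PySem.List.sorted tiles (fun t => t) false).map
      (fun t => PySem.Int.floordiv t 4)).Pairwise (· ≤ ·) := by
    rw [List.pairwise_map]
    exact (PySem.List.sorted_pairwise tiles (fun t => t)).imp (fun h => pv_qf_mono h)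
  have hsr := pv_pairwise_flatMap_replicate
    (fun k => (tiles.map (fun t => PySem.Int.floordiv t 4)).count k) _ hplt
  exact List.Perm.eq_of_pairwise (fun a b _ _ h1 h2 => le_antisymm h1 h2) hsl hsr
    (hpl.trans hpr.symm)

-- string emitted into one suit buffer by B's key loop
def pvEmit (cnt : Int → Int) (off : Int) : List Int → String
  | [] => ""
  | k :: l => pyStrRepeat (PySem.Int.toStr (k + off)) (cnt k) ++ pvEmit cnt off l

theorem pv_toList_pvEmit (cnt : Int → Int) (off : Int) :
    ∀ l : List Int, (pvEmit cnt off l).toList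
      = l.flatMap (fun k => (List.replicate (cnt k).toNat (PySem.Int.toChars (k + off))).flatten)
  | [] => by simp [pvEmit]
  | k :: l => by
      simp [pvEmit, String.toList_append, pv_toList_pvEmit cnt off l, pyStrRepeat,
        PySem.List.pyRepeat, PySem.Int.toList_toStr]

theorem pv_toList_join_map (lst : List Int) (f : Int → Int) :
    (PySem.Str.join "" (lst.map (fun i => PySem.Int.toStr (f i)))).toList
      = lst.flatMap (fun i => PySem.Int.toChars (f i)) := by
  rw [PySem.Str.toList_join, String.toList_empty, List.map_map, pv_join_nil_eq_flatten,
    ← List.flatMap_def]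
  congr 1
  funext i
  exact PySem.Int.toList_toStr _

theorem pv_fold_bufs (cnt : Int → Int) :
    ∀ (ks : List Int) (b : String × String × String × String),
      (ks.foldl (fun (b : String × String × String × String) q =>
        if q < 9 then
          (b.1 ++ pyStrRepeat (PySem.Int.toStr (q + 1)) (cnt q), b.2.1, b.2.2.1, b.2.2.2)
        else if q < 18 then
          (b.1, b.2.1 ++ pyStrRepeat (PySem.Int.toStr (q - 8)) (cnt q), b.2.2.1, b.2.2.2)
        else if q < 27 then
          (b.1, b.2.1, b.2.2.1 ++ pyStrRepeat (PySem.Int.toStr (q - 17)) (cnt q), b.2.2.2)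
        else
          (b.1, b.2.1, b.2.2.1, b.2.2.2 ++ pyStrRepeat (PySem.Int.toStr (q - 26)) (cnt q))) b)
      = (b.1 ++ pvEmit cnt 1 (ks.filter (fun q => decide (q < 9))),
         b.2.1 ++ pvEmit cnt (-8) (ks.filter (fun q => decide (9 ≤ q ∧ q < 18))),
         b.2.2.1 ++ pvEmit cnt (-17) (ks.filter (fun q => decide (18 ≤ q ∧ q < 27))),
         b.2.2.2 ++ pvEmit cnt (-26) (ks.filter (fun q => decide (27 ≤ q))))
  | [], b => by simp [pvEmit, String.append_empty]
  | q :: ks, b => by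
      simp only [List.foldl_cons, List.filter_cons]
      by_cases h0 : q < 9
      · have h1 : ¬(9 ≤ q ∧ q < 18) := by omega
        have h2 : ¬(18 ≤ q ∧ q < 27) := by omega
        have h3 : ¬(27 ≤ q) := by omega
        rw [if_pos h0, pv_fold_bufs cnt ks]
        simp [h0, h1, h2, h3, pvEmit, String.append_assoc]
      · by_cases h1' : q < 18
        · have h1 : (9 ≤ q ∧ q < 18) := by omega
          have h2 : ¬(18 ≤ q ∧ q < 27) := by omega
          have h3 : ¬(27 ≤ q) := by omega
          rw [if_neg h0, if_pos h1', pv_fold_bufs cnt ks]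
          simp [h0, h1, h2, h3, pvEmit, String.append_assoc, sub_eq_add_neg]
        · by_cases h2' : q < 27
          · have h1 : ¬(9 ≤ q ∧ q < 18) := by omega
            have h2 : (18 ≤ q ∧ q < 27) := by omega
            have h3 : ¬(27 ≤ q) := by omega
            rw [if_neg h0, if_neg h1', if_pos h2', pv_fold_bufs cnt ks]
            simp [h0, h1, h2, h3, pvEmit, String.append_assoc, sub_eq_add_neg]
          · have h1 : ¬(9 ≤ q ∧ q < 18) := by omega
            have h2 : ¬(18 ≤ q ∧ q < 27) := by omega
            have h3 : (27 ≤ q) := by omega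
            rw [if_neg h0, if_neg h1', if_neg h2', pv_fold_bufs cnt ks]
            simp [h0, h1, h2, h3, pvEmit, String.append_assoc, sub_eq_add_neg]

theorem pv_suit (tiles : List Int) (pT pQ : Int → Bool) (off : Int) (g : Int → Int)
    (hpt : ∀ t, pT t = pQ (PySem.Int.floordiv t 4))
    (hg : ∀ t, PySem.Int.floordiv (g t) 4 + 1 = PySem.Int.floordiv t 4 + off) :
    PySem.Str.join "" ((((PySem.List.sorted tiles (fun t => t) false).filter pT).map g).map
        (fun i => PySem.Int.toStr (PySem.Int.floordiv i 4 + 1)))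
      = pvEmit (fun q => (PySem.Dict.counter (tiles.map (fun t => PySem.Int.floordiv t 4))).getD q 0) off
          ((PySem.List.sorted (PySem.Set.ofList (tiles.map (fun t => PySem.Int.floordiv t 4)))
            (fun k => k) false).filter pQ) := by
  apply String.ext
  rw [List.map_map]
  rw [show (fun i => PySem.Int.toStr (PySem.Int.floordiv i 4 + 1)) ∘ g
      = (fun i => PySem.Int.toStr ((fun j => PySem.Int.floordiv (g j) 4 + 1) i)) from rfl]
  rw [pv_toList_join_map _ (fun j => PySem.Int.floordiv (g j) 4 + 1)]
  rw [pv_toList_pvEmit]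
  simp only [hg]
  have h1 : ((PySem.List.sorted tiles (fun t => t) false).filter pT).flatMap
      (fun i => PySem.Int.toChars (PySem.Int.floordiv i 4 + off))
      = ((((PySem.List.sorted tiles (fun t => t) false).filter pT).map
          (fun t => PySem.Int.floordiv t 4)).flatMap (fun q => PySem.Int.toChars (q + off))) :=
    (List.flatMap_map (fun t => PySem.Int.floordiv t 4)
      (fun q => PySem.Int.toChars (q + off)) _).symm
  rw [h1]
  have hLM : ((PySem.List.sorted tiles (fun t => t) false).filter pT).map
      (fun t => PySem.Int.floordiv t 4)
      = ((PySem.List.sorted tiles (fun t => t) false).map (fun t => PySem.Int.floordiv t 4)).filter pQ := by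
    rw [List.filter_map]
    congr 1
    apply List.filter_congr
    intro t _
    rw [hpt t]
    rfl
  rw [hLM, pv_sorted_map_eq_flat, pv_flat_piece]
  simp [PySem.Dict.getD_counter, Int.toNat_natCast]

theorem pv_join_empty_nil (f : Int → Int) :
    PySem.Str.join "" (([] : List Int).map (fun i => PySem.Int.toStr (f i))) = "" := by
  apply String.ext
  rw [pv_toList_join_map, String.toList_empty]
  simp

theorem pv_join_ne_empty (lst : List Int) (f : Int → Int) (h : lst ≠ []) :
    PySem.Str.join "" (lst.map (fun i => PySem.Int.toStr (f i))) ≠ "" := by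
  intro hc
  have := congrArg String.toList hc
  rw [pv_toList_join_map, String.toList_empty] at this
  rcases List.exists_mem_of_ne_nil lst h with ⟨x, hx⟩
  exact pv_toChars_ne_nil (f x) (List.flatMap_eq_nil_iff.mp this x hx)

theorem pv_suitstr (tiles : List Int) (pT pQ : Int → Bool) (off : Int) (g : Int → Int)
    (hpt : ∀ t, pT t = pQ (PySem.Int.floordiv t 4))
    (hg : ∀ t, PySem.Int.floordiv (g t) 4 + 1 = PySem.Int.floordiv t 4 + off)
    (suffix : String) :
    (if ((PySem.List.sorted tiles (fun t => t) false).filter pT).map g = [] then ""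
     else PySem.Str.join "" ((((PySem.List.sorted tiles (fun t => t) false).filter pT).map g).map
        (fun i => PySem.Int.toStr (PySem.Int.floordiv i 4 + 1))) ++ suffix)
    = (if pvEmit (fun q => (PySem.Dict.counter (tiles.map (fun t => PySem.Int.floordiv t 4))).getD q 0) off
          ((PySem.List.sorted (PySem.Set.ofList (tiles.map (fun t => PySem.Int.floordiv t 4)))
            (fun k => k) false).filter pQ) = ""
       then pvEmit (fun q => (PySem.Dict.counter (tiles.map (fun t => PySem.Int.floordiv t 4))).getD q 0) off
          ((PySem.List.sorted (PySem.Set.ofList (tiles.map (fun t => PySem.Int.floordiv t 4)))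
            (fun k => k) false).filter pQ)
       else pvEmit (fun q => (PySem.Dict.counter (tiles.map (fun t => PySem.Int.floordiv t 4))).getD q 0) off
          ((PySem.List.sorted (PySem.Set.ofList (tiles.map (fun t => PySem.Int.floordiv t 4)))
            (fun k => k) false).filter pQ) ++ suffix) := by
  have hJ := pv_suit tiles pT pQ off g hpt hg
  by_cases hL : ((PySem.List.sorted tiles (fun t => t) false).filter pT).map g = []
  · rw [if_pos hL]
    have hJ0 : PySem.Str.join "" ((((PySem.List.sorted tiles (fun t => t) false).filter pT).map g).map
        (fun i => PySem.Int.toStr (PySem.Int.floordiv i 4 + 1))) = "" := by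
      rw [hL]; exact pv_join_empty_nil _
    have hE : pvEmit (fun q => (PySem.Dict.counter (tiles.map (fun t => PySem.Int.floordiv t 4))).getD q 0) off
          ((PySem.List.sorted (PySem.Set.ofList (tiles.map (fun t => PySem.Int.floordiv t 4)))
            (fun k => k) false).filter pQ) = "" := hJ.symm.trans hJ0
    rw [hE]
    simp
  · rw [if_neg hL, hJ]
    have hEne : pvEmit (fun q => (PySem.Dict.counter (tiles.map (fun t => PySem.Int.floordiv t 4))).getD q 0) off
          ((PySem.List.sorted (PySem.Set.ofList (tiles.map (fun t => PySem.Int.floordiv t 4)))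
            (fun k => k) false).filter pQ) ≠ "" := by
      rw [← hJ]
      exact pv_join_ne_empty _ _ hL
    rw [if_neg hEne]

theorem pv_main (tiles : List Int) : to_one_line_string tiles = to_one_line_string_alt tiles := by
  have hman := pv_suitstr tiles (fun t => decide (t < 36)) (fun q => decide (q < 9)) 1
    (fun t => t)
    (by intro t; simp only [decide_eq_decide]; rw [pv_qf_eq]; omega)
    (by intro t; rfl) "m"
  simp only [List.map_id'] at hman
  have hpin := pv_suitstr tiles (fun t => decide (36 ≤ t ∧ t < 72)) (fun q => decide (9 ≤ q ∧ q < 18)) (-8)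
    (fun t => t - 36)
    (by intro t; simp only [decide_eq_decide]; rw [pv_qf_eq]; omega)
    (by intro t; simp only; rw [pv_qf_eq, pv_qf_eq]; omega) "p"
  have hsou := pv_suitstr tiles (fun t => decide (72 ≤ t ∧ t < 108)) (fun q => decide (18 ≤ q ∧ q < 27)) (-17)
    (fun t => t - 72)
    (by intro t; simp only [decide_eq_decide]; rw [pv_qf_eq]; omega)
    (by intro t; simp only; rw [pv_qf_eq, pv_qf_eq]; omega) "s"
  have hhon := pv_suitstr tiles (fun t => decide (108 ≤ t)) (fun q => decide (27 ≤ q)) (-26)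
    (fun t => t - 108)
    (by intro t; simp only [decide_eq_decide]; rw [pv_qf_eq]; omega)
    (by intro t; simp only; rw [pv_qf_eq, pv_qf_eq]; omega) "z"
  simp only [to_one_line_string, to_one_line_string_alt,
    PySem.Dict.foldl_insert_getD_add_one_eq_counter, PySem.Dict.keys_counter]
  rw [pv_fold_bufs (fun q => (PySem.Dict.counter (tiles.map (fun t => PySem.Int.floordiv t 4))).getD q 0)]
  dsimp only
  simp only [String.empty_append]
  rw [hman, hpin, hsou, hhon]

-- ===== VERDICT (by name: the statement is the Claim_ definition above) =====
theorem to_one_line_string_spec : Claim_equal_to_one_line_string := by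
  intro tiles _
  unfold Spec_to_one_line_string
  exact pv_main tiles
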